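-- pv_equiv track=rewrite | github.com/luzhouuu/omni_parser | src/browser_agent/models/ui_element.py | classify_element_type
-- ===== SOURCE A (Python) =====
-- from enum import Enum
--
-- class ElementType(str, Enum):
--     """Types of UI elements detected by OmniParser."""
--
--     BUTTON = "button"
--     INPUT = "input"
--     LINK = "link"
--     DROPDOWN = "dropdown"
--     CHECKBOX = "checkbox"
--     RADIO = "radio"
--     TEXT = "text"
--     IMAGE = "image"
--     ICON = "icon"
--     TAB = "tab"
--     MENU = "menu"
--     OTHER = "other"
--
-- def classify_element_type(caption: str) -> ElementType:
--     """Infer element type from caption text.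
--
--     Args:
--         caption: The caption or description of the element
--
--     Returns:
--         Inferred ElementType
--     """
--     caption_lower = caption.lower()
--
--     # Button indicators
--     if any(w in caption_lower for w in ["button", "submit", "click", "btn", "save", "cancel", "ok", "confirm"]):
--         return ElementType.BUTTON
--
--     # Input indicators
--     if any(w in caption_lower for w in ["input", "field", "text box", "textbox", "search", "enter"]):
--         return ElementType.INPUT
--
--     # Link indicators
--     if any(w in caption_lower for w in ["link", "href", "navigate", "go to"]):
--         return ElementType.LINK
--
--     # Dropdown indicators
--     if any(w in caption_lower for w in ["dropdown", "select", "menu", "combobox", "picker"]):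
--         return ElementType.DROPDOWN
--
--     # Checkbox indicators
--     if any(w in caption_lower for w in ["checkbox", "check box", "toggle"]):
--         return ElementType.CHECKBOX
--
--     # Radio indicators
--     if any(w in caption_lower for w in ["radio", "option"]):
--         return ElementType.RADIO
--
--     # Tab indicators
--     if any(w in caption_lower for w in ["tab", "panel"]):
--         return ElementType.TAB
--
--     # Icon indicators
--     if any(w in caption_lower for w in ["icon", "logo", "image", "avatar"]):
--         return ElementType.ICON
--
--     # Text indicators
--     if any(w in caption_lower for w in ["text", "label", "heading", "title", "paragraph"]):
--         return ElementType.TEXT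
--
--     return ElementType.OTHER
-- ===== SOURCE B (Python) =====
-- from enum import Enum
--
-- class ElementType(str, Enum):
--     """Types of UI elements detected by OmniParser."""
--
--     BUTTON = "button"
--     INPUT = "input"
--     LINK = "link"
--     DROPDOWN = "dropdown"
--     CHECKBOX = "checkbox"
--     RADIO = "radio"
--     TEXT = "text"
--     IMAGE = "image"
--     ICON = "icon"
--     TAB = "tab"
--     MENU = "menu"
--     OTHER = "other"
--
-- # Flat keyword -> priority map (lower number = higher priority).
-- _KW_PRIORITY = {
--     "button": 0, "submit": 0, "click": 0, "btn": 0, "save": 0, "cancel": 0, "ok": 0, "confirm": 0,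
--     "input": 1, "field": 1, "text box": 1, "textbox": 1, "search": 1, "enter": 1,
--     "link": 2, "href": 2, "navigate": 2, "go to": 2,
--     "dropdown": 3, "select": 3, "menu": 3, "combobox": 3, "picker": 3,
--     "checkbox": 4, "check box": 4, "toggle": 4,
--     "radio": 5, "option": 5,
--     "tab": 6, "panel": 6,
--     "icon": 7, "logo": 7, "image": 7, "avatar": 7,
--     "text": 8, "label": 8, "heading": 8, "title": 8, "paragraph": 8,
-- }
--
-- _TYPES = [ElementType.BUTTON, ElementType.INPUT, ElementType.LINK, ElementType.DROPDOWN,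
--           ElementType.CHECKBOX, ElementType.RADIO, ElementType.TAB, ElementType.ICON,
--           ElementType.TEXT]
--
-- def classify_element_type(caption: str) -> ElementType:
--     """Collect every keyword occurring in the caption and let the one with the
--     lowest priority number decide the type."""
--     caption_lower = caption.lower()
--     best = min((p for kw, p in _KW_PRIORITY.items() if kw in caption_lower), default=None)
--     return ElementType.OTHER if best is None else _TYPES[best]
-- ===== Notes on version B (the rewrite author's own statement) =====
-- stated objective: alternative
-- what changed: Instead of a priority if-chain that stops at the first matching keyword group, B builds a flat keyword-to-priority map, collects ALL keywords occurring in the caption, and returns the type of the minimum priority found (min-aggregation over a dict comprehension/generator instead of an early-exit branch chain).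
import Mathlib
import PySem

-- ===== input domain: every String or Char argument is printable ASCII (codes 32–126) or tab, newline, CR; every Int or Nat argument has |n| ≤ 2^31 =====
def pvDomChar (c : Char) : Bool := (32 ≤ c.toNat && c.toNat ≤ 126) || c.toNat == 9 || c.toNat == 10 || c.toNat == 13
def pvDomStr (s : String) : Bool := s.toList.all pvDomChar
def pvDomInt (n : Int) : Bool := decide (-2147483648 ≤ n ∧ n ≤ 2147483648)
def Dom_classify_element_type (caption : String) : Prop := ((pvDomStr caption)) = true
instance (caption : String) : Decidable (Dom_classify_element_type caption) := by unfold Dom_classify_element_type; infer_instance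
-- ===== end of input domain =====

-- ===== PORT A =====
def classify_element_type (caption : String) : String :=
  let caption_lower := PySem.Str.lower caption
  if (["button", "submit", "click", "btn", "save", "cancel", "ok", "confirm"].any (fun w => PySem.Str.isIn w caption_lower)) then "button"
  else if (["input", "field", "text box", "textbox", "search", "enter"].any (fun w => PySem.Str.isIn w caption_lower)) then "input"
  else if (["link", "href", "navigate", "go to"].any (fun w => PySem.Str.isIn w caption_lower)) then "link"
  else if (["dropdown", "select", "menu", "combobox", "picker"].any (fun w => PySem.Str.isIn w caption_lower)) then "dropdown"
  else if (["checkbox", "check box", "toggle"].any (fun w => PySem.Str.isIn w caption_lower)) then "checkbox"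
  else if (["radio", "option"].any (fun w => PySem.Str.isIn w caption_lower)) then "radio"
  else if (["tab", "panel"].any (fun w => PySem.Str.isIn w caption_lower)) then "tab"
  else if (["icon", "logo", "image", "avatar"].any (fun w => PySem.Str.isIn w caption_lower)) then "icon"
  else if (["text", "label", "heading", "title", "paragraph"].any (fun w => PySem.Str.isIn w caption_lower)) then "text"
  else "other"

-- ===== PORT B =====
-- B: flat keyword→priority map; all keywords occurring in the caption are collected
-- and the smallest priority wins (min-aggregation instead of a first-match chain). Objective: alternative.
def pvKwPriority : List (String × Nat) :=
  [("button", 0), ("submit", 0), ("click", 0), ("btn", 0), ("save", 0), ("cancel", 0), ("ok", 0), ("confirm", 0),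
   ("input", 1), ("field", 1), ("text box", 1), ("textbox", 1), ("search", 1), ("enter", 1),
   ("link", 2), ("href", 2), ("navigate", 2), ("go to", 2),
   ("dropdown", 3), ("select", 3), ("menu", 3), ("combobox", 3), ("picker", 3),
   ("checkbox", 4), ("check box", 4), ("toggle", 4),
   ("radio", 5), ("option", 5),
   ("tab", 6), ("panel", 6),
   ("icon", 7), ("logo", 7), ("image", 7), ("avatar", 7),
   ("text", 8), ("label", 8), ("heading", 8), ("title", 8), ("paragraph", 8)]

def pvTypes : List String :=
  ["button", "input", "link", "dropdown", "checkbox", "radio", "tab", "icon", "text"]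

-- running minimum of an optional accumulator (port of Python's min(…, default=None))
def pvOmin : Option Nat → Nat → Nat
  | none, p => p
  | some q, p => min q p

def classify_element_type_alt (caption : String) : String :=
  let caption_lower := PySem.Str.lower caption
  let best := pvKwPriority.foldl
    (fun acc kp => if PySem.Str.isIn kp.1 caption_lower then some (pvOmin acc kp.2) else acc) none
  match best with
  | none => "other"
  | some p => pvTypes.getD p "other"   -- _TYPES[best]; best is always 0..8, in range

-- ===== PRECONDITION & SPEC =====
def Spec_classify_element_type (caption : String) (out : String) : Prop := out = classify_element_type_alt caption
instance (caption : String) (out : String) : Decidable (Spec_classify_element_type caption out) := by unfold Spec_classify_element_type; infer_instance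

-- ===== CLAIM (what is proved, stated in full; the proofs are below) =====
def Claim_equal_classify_element_type : Prop := ∀ (caption : String), Dom_classify_element_type caption → Spec_classify_element_type caption (classify_element_type caption)

-- ===== LEMMAS AND PROOFS =====

-- Folding B's min-step over one priority segment (all keywords tagged p):
-- the accumulator becomes `some (pvOmin acc p)` iff some keyword of the segment matches.
lemma pvSeg (cl : String) (p : Nat) :
    ∀ (kws : List String) (acc : Option Nat),
      List.foldl (fun acc kp => if PySem.Str.isIn kp.1 cl then some (pvOmin acc kp.2) else acc) acc
        (kws.map (fun k => (k, p)))
      = if kws.any (fun w => PySem.Str.isIn w cl) then some (pvOmin acc p) else acc := by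
  intro kws
  induction kws with
  | nil => intro acc; simp
  | cons k rest ih =>
    intro acc
    simp only [List.map_cons, List.foldl_cons, List.any_cons]
    by_cases h : PySem.Str.isIn k cl = true
    · rw [if_pos h, ih]
      have hcol : pvOmin (some (pvOmin acc p)) p = pvOmin acc p := by
        cases acc <;> simp [pvOmin]
      rw [hcol]
      simp only [h, Bool.true_or, ite_self]
      simp
    · have hb : PySem.Str.isIn k cl = false := by simpa using h
      rw [if_neg h, ih]
      simp only [hb, Bool.false_or]

-- The nine group-match booleans determine both results; checked over all 512 cases.
lemma pvKey : ∀ (c0 c1 c2 c3 c4 c5 c6 c7 c8 : Bool),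
    (if c0 then "button" else if c1 then "input" else if c2 then "link"
     else if c3 then "dropdown" else if c4 then "checkbox" else if c5 then "radio"
     else if c6 then "tab" else if c7 then "icon" else if c8 then "text" else "other")
    = (let a0 : Option Nat := if c0 then some (pvOmin none 0) else none
       let a1 := if c1 then some (pvOmin a0 1) else a0
       let a2 := if c2 then some (pvOmin a1 2) else a1
       let a3 := if c3 then some (pvOmin a2 3) else a2
       let a4 := if c4 then some (pvOmin a3 4) else a3
       let a5 := if c5 then some (pvOmin a4 5) else a4
       let a6 := if c6 then some (pvOmin a5 6) else a5
       let a7 := if c7 then some (pvOmin a6 7) else a6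
       let a8 := if c8 then some (pvOmin a7 8) else a7
       match a8 with
       | none => "other"
       | some p => pvTypes.getD p "other") := by
  decide

-- ===== VERDICT (by name: the statement is the Claim_ definition above) =====
set_option maxHeartbeats 1600000 in
theorem classify_element_type_spec : Claim_equal_classify_element_type := by
  intro caption _
  unfold Spec_classify_element_type classify_element_type classify_element_type_alt
  set cl := PySem.Str.lower caption with hcl
  have hsplit : pvKwPriority =
      (["button", "submit", "click", "btn", "save", "cancel", "ok", "confirm"].map (fun k => (k, 0))) ++
      (["input", "field", "text box", "textbox", "search", "enter"].map (fun k => (k, 1))) ++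
      (["link", "href", "navigate", "go to"].map (fun k => (k, 2))) ++
      (["dropdown", "select", "menu", "combobox", "picker"].map (fun k => (k, 3))) ++
      (["checkbox", "check box", "toggle"].map (fun k => (k, 4))) ++
      (["radio", "option"].map (fun k => (k, 5))) ++
      (["tab", "panel"].map (fun k => (k, 6))) ++
      (["icon", "logo", "image", "avatar"].map (fun k => (k, 7))) ++
      (["text", "label", "heading", "title", "paragraph"].map (fun k => (k, 8))) := rfl
  rw [hsplit]
  simp only [List.foldl_append, pvSeg]
  exact pvKey _ _ _ _ _ _ _ _ _
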